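-- pv_equiv track=rewrite | github.com/ankur09868/whatsapp_validator | utils.py | prepare_ports_and_user_data
-- ===== SOURCE A (Python) =====
-- def prepare_ports_and_user_data(total_numbers):
--     if total_numbers <= 10:
--         num_ports = 1
--     elif total_numbers <= 20:
--         num_ports = 2
--     elif total_numbers <= 30:
--         num_ports = 3
--     else:
--         num_ports = 4
--     ports = [9222 + i for i in range(num_ports)]
--     user_data_dirs = [f"chrome_profile_{i + 1}" for i in range(num_ports)]
--     return ports, user_data_dirs
-- ===== SOURCE B (Python) =====
-- def prepare_ports_and_user_data(total_numbers):
--     # Peel off batches of 10 numbers, adding one worker (port + profile dir)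
--     # per batch, capped at 4 workers; always at least one worker.
--     ports = [9222]
--     user_data_dirs = ["chrome_profile_1"]
--     remaining = total_numbers - 10
--     while remaining > 0 and len(ports) < 4:
--         i = len(ports)
--         ports.append(9222 + i)
--         user_data_dirs.append(f"chrome_profile_{i + 1}")
--         remaining -= 10
--     return ports, user_data_dirs
-- ===== Notes on version B (the rewrite author's own statement) =====
-- stated objective: alternative
-- what changed: Replaces the four-way threshold ladder plus two comprehensions with an incremental loop that peels the count off in fixed-size batches, appending one (port, profile dir) worker per batch to accumulators, capped at the maximum worker count.
import Mathlib
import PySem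

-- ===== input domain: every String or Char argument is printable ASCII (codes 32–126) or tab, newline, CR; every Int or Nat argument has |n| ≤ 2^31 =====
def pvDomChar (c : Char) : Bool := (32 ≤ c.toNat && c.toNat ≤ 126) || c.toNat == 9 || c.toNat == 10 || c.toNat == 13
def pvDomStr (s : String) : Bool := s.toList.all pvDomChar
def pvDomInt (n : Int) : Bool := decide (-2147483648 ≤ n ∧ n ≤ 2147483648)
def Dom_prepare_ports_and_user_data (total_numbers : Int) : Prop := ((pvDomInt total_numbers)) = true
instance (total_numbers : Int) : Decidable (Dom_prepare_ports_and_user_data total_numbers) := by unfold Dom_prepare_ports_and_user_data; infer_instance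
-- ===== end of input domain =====

-- B replaces the threshold ladder + comprehensions by an incremental loop that
-- peels the count off in fixed-size batches, one (port, dir) per batch, capped.

-- ===== PORT A =====
def npA (total_numbers : Int) : Int :=
  if total_numbers ≤ 10 then 1
  else if total_numbers ≤ 20 then 2
  else if total_numbers ≤ 30 then 3
  else 4

def prepare_ports_and_user_data (total_numbers : Int) : List Int × List String :=
  let num_ports := npA total_numbers
  let ports := (PySem.List.pyRange 0 num_ports 1).map (fun i => 9222 + i)
  let user_data_dirs := (PySem.List.pyRange 0 num_ports 1).map
      (fun i => "chrome_profile_" ++ PySem.Int.toStr (i + 1))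
  (ports, user_data_dirs)

-- ===== PORT B =====
-- the while loop: fuel = number of appends still allowed (4 - len(ports)),
-- which is exactly the loop's bound; 'remaining > 0' is the other guard.
def loopB : Nat → Int → List Int → List String → List Int × List String
  | 0, _, ports, dirs => (ports, dirs)
  | Nat.succ slots, remaining, ports, dirs =>
    if remaining > 0 then
      let i : Int := ports.length
      loopB slots (remaining - 10) (ports ++ [9222 + i])
        (dirs ++ ["chrome_profile_" ++ PySem.Int.toStr (i + 1)])
    else (ports, dirs)

def prepare_ports_and_user_data_alt (total_numbers : Int) : List Int × List String :=
  loopB 3 (total_numbers - 10) [9222] ["chrome_profile_1"]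

-- ===== PRECONDITION & SPEC =====
def Spec_prepare_ports_and_user_data (total_numbers : Int) (out : List Int × List String) : Prop := out = prepare_ports_and_user_data_alt total_numbers
instance (total_numbers : Int) (out : List Int × List String) : Decidable (Spec_prepare_ports_and_user_data total_numbers out) := by unfold Spec_prepare_ports_and_user_data; infer_instance

-- ===== CLAIM (what is proved, stated in full; the proofs are below) =====
def Claim_equal_prepare_ports_and_user_data : Prop := ∀ (total_numbers : Int), Dom_prepare_ports_and_user_data total_numbers → Spec_prepare_ports_and_user_data total_numbers (prepare_ports_and_user_data total_numbers)

-- ===== LEMMAS AND PROOFS =====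
theorem altB_eval (n : Int) :
    prepare_ports_and_user_data_alt n =
      if n ≤ 10 then ([9222], ["chrome_profile_1"])
      else if n ≤ 20 then ([9222, 9223], ["chrome_profile_1", "chrome_profile_2"])
      else if n ≤ 30 then ([9222, 9223, 9224],
        ["chrome_profile_1", "chrome_profile_2", "chrome_profile_3"])
      else ([9222, 9223, 9224, 9225],
        ["chrome_profile_1", "chrome_profile_2", "chrome_profile_3", "chrome_profile_4"]) := by
  unfold prepare_ports_and_user_data_alt
  simp only [loopB]
  by_cases h1 : n ≤ 10
  · rw [if_neg (show ¬ n - 10 > 0 by omega)]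
    simp [h1]
  · by_cases h2 : n ≤ 20
    · rw [if_pos (show n - 10 > 0 by omega), if_neg (show ¬ n - 10 - 10 > 0 by omega)]
      simp [h1, h2]
      decide
    · by_cases h3 : n ≤ 30
      · rw [if_pos (show n - 10 > 0 by omega), if_pos (show n - 10 - 10 > 0 by omega),
          if_neg (show ¬ n - 10 - 10 - 10 > 0 by omega)]
        simp [h1, h2, h3]
        decide
      · rw [if_pos (show n - 10 > 0 by omega), if_pos (show n - 10 - 10 > 0 by omega),
          if_pos (show n - 10 - 10 - 10 > 0 by omega)]
        simp [h1, h2, h3]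
        decide

theorem portA_eval (n : Int) :
    prepare_ports_and_user_data n =
      if n ≤ 10 then ([9222], ["chrome_profile_1"])
      else if n ≤ 20 then ([9222, 9223], ["chrome_profile_1", "chrome_profile_2"])
      else if n ≤ 30 then ([9222, 9223, 9224],
        ["chrome_profile_1", "chrome_profile_2", "chrome_profile_3"])
      else ([9222, 9223, 9224, 9225],
        ["chrome_profile_1", "chrome_profile_2", "chrome_profile_3", "chrome_profile_4"]) := by
  unfold prepare_ports_and_user_data npA
  split_ifs <;> decide

-- ===== VERDICT (by name: the statement is the Claim_ definition above) =====
theorem prepare_ports_and_user_data_spec : Claim_equal_prepare_ports_and_user_data := by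
  intro n _
  unfold Spec_prepare_ports_and_user_data
  rw [portA_eval, altB_eval]
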